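-- pv_equiv track=rewrite | github.com/lizardp1/flag_game | paper/final_charts/paper/make_flag_memory_conflict_probe_visuals.py | infer_models
-- ===== SOURCE A (Python) =====
-- from typing import Any
--
-- def infer_models(rows: list[dict[str, Any]]) -> list[str]:
--     available = {str(row["model"]) for row in rows}
--     preferred = [
--         "gpt-4o",
--         "gpt-5.4",
--         "claude-haiku-4-5-20251001",
--         "claude-sonnet-4-6",
--         "claude-opus-4-7",
--         "claude-opus-4-6",
--         "claude-opus-4-1",
--     ]
--     ordered = [model for model in preferred if model in available]
--     ordered.extend(sorted(available - set(ordered)))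
--     return ordered
-- ===== SOURCE B (Python) =====
-- def infer_models(rows):
--     available = {str(row["model"]) for row in rows}
--     preferred = [
--         "gpt-4o",
--         "gpt-5.4",
--         "claude-haiku-4-5-20251001",
--         "claude-sonnet-4-6",
--         "claude-opus-4-7",
--         "claude-opus-4-6",
--         "claude-opus-4-1",
--     ]
--
--     def key(m):
--         return (preferred.index(m), m) if m in preferred else (len(preferred), m)
--
--     return sorted(available, key=key)
-- ===== Notes on version B (the rewrite author's own statement) =====
-- stated objective: simpler
-- what changed: Replaces A's two-phase construction (filter the preferred list by availability, then extend with a sorted set difference) by one sorted() call over the available set with a composite key (position in the preferred list, or its length, then the name itself).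
import Mathlib
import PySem

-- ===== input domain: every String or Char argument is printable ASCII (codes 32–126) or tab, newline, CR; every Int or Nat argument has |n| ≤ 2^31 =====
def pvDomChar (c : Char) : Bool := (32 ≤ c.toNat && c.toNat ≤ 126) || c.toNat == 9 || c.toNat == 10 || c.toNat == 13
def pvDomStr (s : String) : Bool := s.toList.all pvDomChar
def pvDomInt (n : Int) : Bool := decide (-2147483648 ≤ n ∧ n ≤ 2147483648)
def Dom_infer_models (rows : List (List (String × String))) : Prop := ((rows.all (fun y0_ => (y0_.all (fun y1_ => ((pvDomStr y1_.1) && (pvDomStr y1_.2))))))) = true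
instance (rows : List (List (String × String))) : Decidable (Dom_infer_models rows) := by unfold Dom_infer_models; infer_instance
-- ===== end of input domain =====

-- B replaces A's two-phase build (filter preferred by availability, then extend with a sorted
-- set difference) by one keyed sort of the available set — simpler, same result.

-- the preferred-model list, shared literal of both Pythons
def pvPreferred : List String :=
  ["gpt-4o", "gpt-5.4", "claude-haiku-4-5-20251001", "claude-sonnet-4-6",
   "claude-opus-4-7", "claude-opus-4-6", "claude-opus-4-1"]

-- str(row["model"]) for every row; none = some row lacks the key (KeyError in Python)
def pvModels (rows : List (List (String × String))) : Option (List String) :=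
  rows.mapM (fun r => (PySem.Dict.mk r).get? "model")

-- ===== PORT A =====
def infer_models (rows : List (List (String × String))) : List String :=
  match pvModels rows with
  | none => []   -- unreachable under Pre_ (Python raises KeyError)
  | some ms =>
    let available : PySem.Set String := PySem.Set.ofList ms
    let ordered := pvPreferred.filter (fun m => PySem.Set.contains available m)
    ordered ++ PySem.List.sorted (PySem.Set.diff available (PySem.Set.ofList ordered)) (fun x => x) false

-- ===== PORT B =====
-- key(m) = (preferred.index(m), m) if m in preferred else (len(preferred), m)
def pvKey1 (m : String) : Int :=
  match PySem.List.index? pvPreferred m with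
  | some i => (i : Int)
  | none => (pvPreferred.length : Int)

def infer_models_alt (rows : List (List (String × String))) : List String :=
  match pvModels rows with
  | none => []   -- unreachable under Pre_ (Python raises KeyError)
  | some ms => PySem.List.sorted2 (PySem.Set.ofList ms) pvKey1 (fun m => m) false

-- ===== PRECONDITION & SPEC =====
-- Pre_ excludes exactly the rows lacking a "model" key, on which Python A raises KeyError.
def Pre_infer_models (rows : List (List (String × String))) : Prop :=
  ∀ r ∈ rows, (PySem.Dict.mk r).contains "model" = true
instance (rows : List (List (String × String))) : Decidable (Pre_infer_models rows) := by
  unfold Pre_infer_models; infer_instance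

def pvWitness_infer_models : (List (List (String × String))) :=
  [[("model", "gpt-4o")], [("model", "zzz")]]

def Spec_infer_models (rows : List (List (String × String))) (out : List String) : Prop := out = infer_models_alt rows
instance (rows : List (List (String × String))) (out : List String) : Decidable (Spec_infer_models rows out) := by unfold Spec_infer_models; infer_instance

-- ===== CLAIM (what is proved, stated in full; the proofs are below) =====
def Claim_equal_infer_models : Prop := ∀ (rows : List (List (String × String))), Dom_infer_models rows → Pre_infer_models rows → Spec_infer_models rows (infer_models rows)

-- ===== LEMMAS AND PROOFS =====

theorem pvWitness_ok : Dom_infer_models pvWitness_infer_models ∧ Pre_infer_models pvWitness_infer_models := by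
  constructor <;> decide

-- a tuple-keyed sorted2 is a sorted with the lexicographic composite key
theorem sorted2_eq_sorted_lex {α κ₁ κ₂ : Type} [LinearOrder κ₁] [LinearOrder κ₂]
    (xs : List α) (k1 : α → κ₁) (k2 : α → κ₂) :
    PySem.List.sorted2 xs k1 k2 false
      = PySem.List.sorted xs (fun x => toLex (k1 x, k2 x)) false := by
  unfold PySem.List.sorted2 PySem.List.sorted
  have hbefore : (fun a b => decide (k1 a < k1 b) || (!decide (k1 b < k1 a) && decide (k2 a < k2 b)))
      = (fun a b : α => decide ((toLex (k1 a, k2 a) : Lex (κ₁ × κ₂)) < toLex (k1 b, k2 b))) := by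
    funext a b
    rcases lt_trichotomy (k1 a) (k1 b) with h | h | h <;>
      simp [Prod.Lex.lt_iff, h, lt_asymm]
  simp only [if_neg (by decide : ¬ (false = true))]
  rw [hbefore]

theorem pvPreferred_nodup : pvPreferred.Nodup := by decide

theorem pvKey1_pairwise : pvPreferred.Pairwise (fun a b => pvKey1 a < pvKey1 b) := by decide

theorem pvKey1_lt_of_mem {m : String} (h : m ∈ pvPreferred) : pvKey1 m < 7 := by
  fin_cases h <;> decide

theorem pvKey1_of_not_mem {m : String} (h : m ∉ pvPreferred) : pvKey1 m = 7 := by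
  unfold pvKey1
  rw [(PySem.List.index?_eq_none_iff pvPreferred m).mpr h]
  decide

-- the core identity, for any extracted model list
theorem core_eq (ms : List String) :
    (let available : PySem.Set String := PySem.Set.ofList ms
     let ordered := pvPreferred.filter (fun m => PySem.Set.contains available m)
     ordered ++ PySem.List.sorted (PySem.Set.diff available (PySem.Set.ofList ordered)) (fun x => x) false)
      = PySem.List.sorted2 (PySem.Set.ofList ms) pvKey1 (fun m => m) false := by
  rw [sorted2_eq_sorted_lex]
  set avail : List String := PySem.Set.ofList ms with havail
  have hnavail : avail.Nodup := PySem.Set.nodup_ofList ms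
  set ordered : List String := pvPreferred.filter (fun m => PySem.Set.contains avail m) with hord
  have hnord : ordered.Nodup := pvPreferred_nodup.filter _
  have hofl : PySem.Set.ofList ordered = ordered := PySem.Set.ofList_eq_self_of_nodup ordered hnord
  -- membership facts
  have hsub : ∀ x ∈ ordered, x ∈ avail := by
    intro x hx
    have := List.mem_filter.mp hx
    simpa [PySem.Set.contains, List.contains_iff_mem] using this.2
  have hmem_ord : ∀ x, x ∈ avail → x ∈ pvPreferred → x ∈ ordered := by
    intro x hxa hxp
    exact List.mem_filter.mpr ⟨hxp, by simpa [PySem.Set.contains, List.contains_iff_mem] using hxa⟩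
  set diffL : List String := PySem.Set.diff avail (PySem.Set.ofList ordered) with hdiff
  have hdiff' : diffL = avail.filter (fun x => !ordered.contains x) := by
    rw [hdiff, hofl]; rfl
  have hmem_diff : ∀ x ∈ diffL, x ∈ avail ∧ x ∉ ordered := by
    intro x hx
    rw [hdiff'] at hx
    have := List.mem_filter.mp hx
    exact ⟨this.1, by simpa [List.contains_iff_mem] using this.2⟩
  have hdiff_not_pref : ∀ x ∈ diffL, x ∉ pvPreferred := by
    intro x hx hxp
    exact (hmem_diff x hx).2 (hmem_ord x (hmem_diff x hx).1 hxp)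
  have hndiff : diffL.Nodup := by rw [hdiff']; exact hnavail.filter _
  set sdiff : List String := PySem.List.sorted diffL (fun x => x) false with hsd
  have hsdperm : sdiff.Perm diffL := PySem.List.sorted_perm diffL (fun x => x) false
  -- the permutation
  have hperm : (ordered ++ sdiff).Perm avail := by
    have h1 : (ordered ++ sdiff).Perm (ordered ++ diffL) := List.Perm.append_left ordered hsdperm
    have h2 : ordered.Perm (avail.filter (fun x => ordered.contains x)) := by
      rw [List.perm_ext_iff_of_nodup hnord (hnavail.filter _)]
      intro a
      constructor
      · intro ha
        exact List.mem_filter.mpr ⟨hsub a ha, by simpa [List.contains_iff_mem] using ha⟩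
      · intro ha
        have := List.mem_filter.mp ha
        simpa [List.contains_iff_mem] using this.2
    have h3 : (ordered ++ diffL).Perm
        (avail.filter (fun x => ordered.contains x) ++ avail.filter (fun x => !ordered.contains x)) := by
      rw [hdiff']
      exact h2.append (List.Perm.refl _)
    exact (h1.trans h3).trans (List.filter_append_perm _ avail)
  -- pairwise strictly-increasing composite key
  have hpair : (ordered ++ sdiff).Pairwise
      (fun a b => (toLex (pvKey1 a, a) : Lex (Int × String)) < toLex (pvKey1 b, b)) := by
    rw [List.pairwise_append]
    refine ⟨?_, ?_, ?_⟩
    · exact (pvKey1_pairwise.filter _).imp (fun h => Prod.Lex.lt_iff.mpr (Or.inl h))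
    · have hle : sdiff.Pairwise (fun a b : String => a ≤ b) :=
        PySem.List.sorted_pairwise diffL (fun x => x)
      have hne : sdiff.Pairwise (fun a b : String => a ≠ b) :=
        ((hsdperm.nodup_iff).mpr hndiff)
      have hlt : sdiff.Pairwise (fun a b : String => a < b) :=
        (hle.and hne).imp (fun h => lt_of_le_of_ne h.1 h.2)
      refine hlt.imp_of_mem (fun {a b} ha hb h => ?_)
      have ha7 : pvKey1 a = 7 := pvKey1_of_not_mem (hdiff_not_pref a (hsdperm.mem_iff.mp ha))
      have hb7 : pvKey1 b = 7 := pvKey1_of_not_mem (hdiff_not_pref b (hsdperm.mem_iff.mp hb))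
      exact Prod.Lex.lt_iff.mpr (Or.inr ⟨by simp [ha7, hb7], h⟩)
    · intro a ha b hb
      have ha7 : pvKey1 a < 7 := pvKey1_lt_of_mem (List.mem_filter.mp ha).1
      have hb7 : pvKey1 b = 7 := pvKey1_of_not_mem (hdiff_not_pref b (hsdperm.mem_iff.mp hb))
      exact Prod.Lex.lt_iff.mpr (Or.inl (by rw [hb7]; exact ha7))
  exact (PySem.List.sorted_eq_of_perm_of_pairwise_lt avail (ordered ++ sdiff) _ hperm hpair).symm

theorem pvModels_isSome {rows : List (List (String × String))}
    (h : Pre_infer_models rows) : (pvModels rows).isSome := by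
  induction rows with
  | nil => rfl
  | cons r rs ih =>
    have hr : ((PySem.Dict.mk r).get? "model").isSome = true := by
      rw [← PySem.Dict.contains_eq_isSome_get?]
      exact h r List.mem_cons_self
    have hrs : (pvModels rs).isSome := ih (fun r' hr' => h r' (List.mem_cons_of_mem _ hr'))
    unfold pvModels at hrs ⊢
    rw [List.mapM_cons]
    obtain ⟨v, hv⟩ := Option.isSome_iff_exists.mp hr
    obtain ⟨vs, hvs⟩ := Option.isSome_iff_exists.mp hrs
    simp [hv, hvs]

-- ===== VERDICT (by name: the statement is the Claim_ definition above) =====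
theorem infer_models_spec : Claim_equal_infer_models := by
  intro rows _ hpre
  unfold Spec_infer_models infer_models infer_models_alt
  cases hm : pvModels rows with
  | none => exact absurd (pvModels_isSome hpre) (by rw [hm]; decide)
  | some ms => exact core_eq ms
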